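-- pv_equiv track=rewrite | github.com/yypy22/apertium-jpn | tokenize.py | string_op
-- ===== SOURCE A (Python) =====
-- def string_op(op):
--     ret = ''
--     last_unk = False
--     for s in op:
--         if s[0] == '*':
--             if last_unk:
--                 ret += s[1:]
--             elif ret:
--                 ret += '+' + s
--             else:
--                 ret += s
--             last_unk = True
--         else:
--             if ret:
--                 ret += '+'
--             ret += s
--     return ret
-- ===== SOURCE B (Python) =====
-- def string_op(op):
--     k = next((i for i, s in enumerate(op) if s[0] == '*'), None)
--     if k is None:
--         return '+'.join(op)
--     pieces = ['+'.join(op[:k + 1])]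
--     for s in op[k + 1:]:
--         pieces.append(s[1:] if s[0] == '*' else '+' + s)
--     return ''.join(pieces)
-- ===== Notes on version B (the rewrite author's own statement) =====
-- stated objective: alternative
-- what changed: B replaces A's single stateful pass with a running string and last_unk flag by a staged computation: find the index of the first unknown token, '+'-join everything up to and including it, then map each later token to either its tail (unknown, merged with no separator) or '+'+token, and concatenate the pieces.
import Mathlib
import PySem

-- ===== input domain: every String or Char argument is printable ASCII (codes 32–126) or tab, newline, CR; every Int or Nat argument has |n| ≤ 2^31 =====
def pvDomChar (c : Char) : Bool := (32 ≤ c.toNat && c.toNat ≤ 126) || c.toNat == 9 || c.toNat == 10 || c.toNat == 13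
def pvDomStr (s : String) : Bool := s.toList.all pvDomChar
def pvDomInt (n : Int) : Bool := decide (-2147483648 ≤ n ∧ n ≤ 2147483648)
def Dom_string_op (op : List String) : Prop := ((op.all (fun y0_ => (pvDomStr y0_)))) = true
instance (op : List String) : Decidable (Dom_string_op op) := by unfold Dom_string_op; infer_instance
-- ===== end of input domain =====

-- B stages the computation: find the first unknown token, '+'-join the prefix through it,
-- then map later tokens to merged-tail or '+'+token — replacing A's stateful flag pass.


-- ===== PORT A =====
-- state: (ret as List Char, last_unk); s[0] on an empty token raises in Python (excluded by Pre_),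
-- the port leaves the state unchanged there.
def stepA (st : List Char × Bool) (s : String) : List Char × Bool :=
  match s.toList with
  | [] => st
  | c :: rest =>
    if c = '*' then
      if st.2 then (st.1 ++ rest, true)
      else if st.1 ≠ [] then (st.1 ++ '+' :: c :: rest, true)
      else (st.1 ++ c :: rest, true)
    else
      ((if st.1 ≠ [] then st.1 ++ ['+'] else st.1) ++ c :: rest, st.2)

def string_op (op : List String) : String :=
  String.ofList (op.foldl stepA ([], false)).1

-- ===== PORT B =====
-- s[0] == '*' (empty tokens are excluded by Pre_; the port answers false there)
def bStar (s : String) : Bool :=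
  match s.toList with
  | [] => false
  | c :: _ => c == '*'

-- '+'.join over char lists
def joinPlus (gs : List (List Char)) : List Char :=
  match gs with
  | [] => []
  | [g] => g
  | g :: gs' => g ++ '+' :: joinPlus gs'

-- s[1:] if s[0] == '*' else '+' + s
def tailPart (s : String) : List Char :=
  if bStar s then s.toList.drop 1 else '+' :: s.toList

def string_op_alt (op : List String) : String :=
  match op.findIdx? (fun s => bStar s) with
  | none => String.ofList (joinPlus (op.map String.toList))
  | some k =>
      String.ofList (joinPlus ((op.take (k + 1)).map String.toList)
                 ++ ((op.drop (k + 1)).map tailPart).flatten)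

-- ===== PRECONDITION & SPEC =====
-- Pre_ excludes lists containing an empty token, on which A (and B) raise IndexError at s[0].
def Pre_string_op (op : List String) : Prop := "" ∉ op
instance (op : List String) : Decidable (Pre_string_op op) := by unfold Pre_string_op; infer_instance
def pvWitness_string_op : List String := ["*ab", "cd", "*e", "*f"]
def Spec_string_op (op : List String) (out : String) : Prop := out = string_op_alt op
instance (op : List String) (out : String) : Decidable (Spec_string_op op out) := by unfold Spec_string_op; infer_instance

-- ===== CLAIM (what is proved, stated in full; the proofs are below) =====
def Claim_equal_string_op : Prop := ∀ (op : List String), Dom_string_op op → Pre_string_op op → Spec_string_op op (string_op op)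

-- ===== LEMMAS AND PROOFS =====

theorem toList_ne_nil (s : String) (hs : s ≠ "") : s.toList ≠ [] := by
  simpa [String.toList_eq_nil_iff] using hs

-- after the first unknown: last_unk stays true forever and each token appends its tailPart
theorem foldA_post (op : List String) : ∀ (ret : List Char),
    ret ≠ [] → (∀ s ∈ op, s ≠ "") →
    (op.foldl stepA (ret, true)).1 = ret ++ (op.map tailPart).flatten := by
  induction op with
  | nil => intro ret _ _; simp
  | cons s op ih =>
    intro ret hr hne
    have hlist := toList_ne_nil s (hne s (by simp))
    cases hc : s.toList with
    | nil => exact absurd hc hlist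
    | cons c rest =>
      by_cases hstar : c = '*'
      · have hA : stepA (ret, true) s = (ret ++ rest, true) := by
          simp [stepA, hc, hstar]
        simp only [List.foldl_cons, hA,
          ih (ret ++ rest) (by simp [hr]) (fun x hx => hne x (List.mem_cons_of_mem _ hx))]
        simp [tailPart, bStar, hc, hstar]
      · have hA : stepA (ret, true) s = (ret ++ ['+'] ++ c :: rest, true) := by
          simp [stepA, hc, hstar, hr]
        have hih := ih (ret ++ ['+'] ++ c :: rest) (by simp)
          (fun x hx => hne x (List.mem_cons_of_mem _ hx))
        simp only [List.foldl_cons, hA, hih]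
        simp [tailPart, bStar, hc, hstar]

theorem joinPlus_cons (x : List Char) (gs : List (List Char)) :
    joinPlus (x :: gs) = x ++ (gs.map (fun g => '+' :: g)).flatten := by
  induction gs generalizing x with
  | nil => simp [joinPlus]
  | cons g gs ih =>
    rw [show joinPlus (x :: g :: gs) = x ++ '+' :: joinPlus (g :: gs) from rfl, ih g]
    simp

-- before the first unknown, with a nonempty ret: every token gets a '+' separator
theorem foldA_pre (op : List String) : ∀ (ret : List Char),
    ret ≠ [] → (∀ s ∈ op, s ≠ "") →
    (op.foldl stepA (ret, false)).1 =
      match op.findIdx? (fun s => bStar s) with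
      | none => ret ++ (op.map (fun s => '+' :: s.toList)).flatten
      | some k => ret ++ ((op.take (k + 1)).map (fun s => '+' :: s.toList)).flatten
                  ++ ((op.drop (k + 1)).map tailPart).flatten := by
  induction op with
  | nil => intro ret _ _; simp [List.findIdx?_nil]
  | cons s op ih =>
    intro ret hr hne
    have hlist := toList_ne_nil s (hne s (by simp))
    have hne' : ∀ x ∈ op, x ≠ "" := fun x hx => hne x (List.mem_cons_of_mem _ hx)
    cases hc : s.toList with
    | nil => exact absurd hc hlist
    | cons c rest =>
      by_cases hstar : c = '*'
      · have hbs : bStar s = true := by simp [bStar, hc, hstar]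
        have hA : stepA (ret, false) s = (ret ++ '+' :: c :: rest, true) := by
          simp [stepA, hc, hstar, hr]
        rw [List.findIdx?_cons]
        simp only [hbs, if_true]
        have hpost := foldA_post op (ret ++ '+' :: c :: rest) (by simp) hne'
        simp only [List.foldl_cons, hA, hpost]
        simp [hc]
      · have hbs : bStar s = false := by simp [bStar, hc, hstar]
        have hA : stepA (ret, false) s = (ret ++ ['+'] ++ c :: rest, false) := by
          simp [stepA, hc, hstar, hr]
        rw [List.findIdx?_cons]
        simp only [hbs, Bool.false_eq_true, if_false]
        have hih := ih (ret ++ ['+'] ++ c :: rest) (by simp) hne'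
        simp only [List.foldl_cons, hA, hih]
        cases hf : op.findIdx? (fun s => bStar s) with
        | none => simp [hc]
        | some k => simp [hc, List.take_succ_cons, List.drop_succ_cons]

theorem main_lemma (op : List String) (hne : ∀ s ∈ op, s ≠ "") :
    (op.foldl stepA ([], false)).1 =
      match op.findIdx? (fun s => bStar s) with
      | none => joinPlus (op.map String.toList)
      | some k => joinPlus ((op.take (k + 1)).map String.toList)
                  ++ ((op.drop (k + 1)).map tailPart).flatten := by
  cases op with
  | nil => simp [List.findIdx?_nil, joinPlus]
  | cons s op =>
    have hlist := toList_ne_nil s (hne s (by simp))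
    have hne' : ∀ x ∈ op, x ≠ "" := fun x hx => hne x (List.mem_cons_of_mem _ hx)
    cases hc : s.toList with
    | nil => exact absurd hc hlist
    | cons c rest =>
      by_cases hstar : c = '*'
      · have hbs : bStar s = true := by simp [bStar, hc, hstar]
        have hA : stepA ([], false) s = (c :: rest, true) := by
          simp [stepA, hc, hstar]
        rw [List.findIdx?_cons]
        simp only [hbs, if_true]
        have hpost := foldA_post op (c :: rest) (by simp) hne'
        simp only [List.foldl_cons, hA, hpost]
        simp [joinPlus, hc]
      · have hbs : bStar s = false := by simp [bStar, hc, hstar]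
        have hA : stepA ([], false) s = (c :: rest, false) := by
          simp [stepA, hc, hstar]
        rw [List.findIdx?_cons]
        simp only [hbs, Bool.false_eq_true, if_false]
        have hpre := foldA_pre op (c :: rest) (by simp) hne'
        simp only [List.foldl_cons, hA, hpre]
        cases hf : op.findIdx? (fun s => bStar s) with
        | none => simp [joinPlus_cons, hc, Function.comp_def]
        | some k =>
          simp [List.take_succ_cons, List.drop_succ_cons, joinPlus_cons, hc,
            Function.comp_def]

-- ===== VERDICT (by name: the statement is the Claim_ definition above) =====
theorem string_op_spec : Claim_equal_string_op := by
  intro op _ hpre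
  unfold Spec_string_op string_op string_op_alt
  have hne : ∀ s ∈ op, s ≠ "" := fun s hs h => hpre (h ▸ hs)
  rw [main_lemma op hne]
  cases h : op.findIdx? (fun s => bStar s) <;> simp
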